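-- pv_equiv track=rewrite | github.com/slundberg-1955/harness-analytics | scripts/run_railway_analytics.py | _parse_argv
-- ===== SOURCE A (Python) =====
-- def _parse_argv(argv: list[str]) -> tuple[bool, bool, list[str]]:
--     """Return (local, detached, analytics_argv)."""
--     local = False
--     detached = True
--     out: list[str] = []
--     i = 0
--     while i < len(argv):
--         a = argv[i]
--         if a == "--local":
--             local = True
--             i += 1
--             continue
--         if a in ("--foreground", "-f"):
--             detached = False
--             i += 1
--             continue
--         out.append(a)
--         i += 1
--     return local, detached, out
-- ===== SOURCE B (Python) =====
-- def _parse_argv(argv: list[str]) -> tuple[bool, bool, list[str]]: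
--     """Return (local, detached, analytics_argv)."""
--     local = "--local" in argv
--     detached = not any(a in ("--foreground", "-f") for a in argv)
--     out = [a for a in argv if a not in ("--local", "--foreground", "-f")]
--     return local, detached, out
-- ===== Notes on version B (the rewrite author's own statement) =====
-- stated objective: simpler
-- what changed: Replaces the single fused while-loop with mutable state by three independent declarative scans: a membership test for local, an any() for detached, and a comprehension for the remaining args.
import Mathlib
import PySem

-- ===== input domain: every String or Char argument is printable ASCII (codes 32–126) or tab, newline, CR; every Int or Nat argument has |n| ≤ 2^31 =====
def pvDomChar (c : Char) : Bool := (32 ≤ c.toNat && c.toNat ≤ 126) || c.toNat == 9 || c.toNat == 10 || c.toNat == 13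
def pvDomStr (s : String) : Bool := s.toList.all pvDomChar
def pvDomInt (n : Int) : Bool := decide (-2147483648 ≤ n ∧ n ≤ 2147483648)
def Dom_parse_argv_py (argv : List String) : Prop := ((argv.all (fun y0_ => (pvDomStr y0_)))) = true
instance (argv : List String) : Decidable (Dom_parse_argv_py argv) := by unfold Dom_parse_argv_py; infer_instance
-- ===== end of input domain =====

-- B replaces A's single fused while-loop with three independent scans (membership, any, filter); same cost, plainer code.

-- ===== PORT A =====
-- A's while-loop over index i with mutable state (local, detached, out), transcribed as
-- structural recursion over the remaining argv, same branch order, out built by append.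
def parseA_loop (rest : List String) (local_ detached : Bool) (out : List String) :
    Bool × Bool × List String :=
  match rest with
  | [] => (local_, detached, out)
  | a :: tl =>
    if a = "--local" then parseA_loop tl true detached out
    else if a = "--foreground" ∨ a = "-f" then parseA_loop tl local_ false out
    else parseA_loop tl local_ detached (out ++ [a])

def parse_argv_py (argv : List String) : Bool × Bool × List String :=
  parseA_loop argv false true []

-- ===== PORT B =====
def parse_argv_py_alt (argv : List String) : Bool × Bool × List String :=
  ( argv.contains "--local",
    !(argv.any (fun a => a = "--foreground" ∨ a = "-f")),
    argv.filter (fun a => ¬ (a = "--local" ∨ a = "--foreground" ∨ a = "-f")) )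

-- ===== PRECONDITION & SPEC =====
def Spec_parse_argv_py (argv : List String) (out : Bool × Bool × List String) : Prop := out = parse_argv_py_alt argv
instance (argv : List String) (out : Bool × Bool × List String) : Decidable (Spec_parse_argv_py argv out) := by unfold Spec_parse_argv_py; infer_instance

-- ===== CLAIM (what is proved, stated in full; the proofs are below) =====
def Claim_equal_parse_argv_py : Prop := ∀ (argv : List String), Dom_parse_argv_py argv → Spec_parse_argv_py argv (parse_argv_py argv)

-- ===== LEMMAS AND PROOFS =====
lemma parseA_loop_eq (rest : List String) :
    ∀ (local_ detached : Bool) (out : List String),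
    parseA_loop rest local_ detached out =
      ( local_ || rest.contains "--local",
        detached && !(rest.any (fun a => a = "--foreground" ∨ a = "-f")),
        out ++ rest.filter (fun a => ¬ (a = "--local" ∨ a = "--foreground" ∨ a = "-f")) ) := by
  induction rest with
  | nil => intro l d o; simp [parseA_loop]
  | cons a tl ih =>
    intro l d o
    by_cases h1 : a = "--local"
    · simp [parseA_loop, h1, ih]
    · by_cases h2 : a = "--foreground" ∨ a = "-f"
      · simp [parseA_loop, h1, h2, ih]
        rcases h2 with h | h <;> simp [h]
      · have h3 : ¬ a = "--foreground" := fun h => h2 (Or.inl h)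
        have h4 : ¬ a = "-f" := fun h => h2 (Or.inr h)
        have h1' : ¬ "--local" = a := fun h => h1 h.symm
        simp [parseA_loop, h1, h1', h3, h4, ih]

-- ===== VERDICT (by name: the statement is the Claim_ definition above) =====
theorem parse_argv_py_spec : Claim_equal_parse_argv_py := by
  intro argv _
  unfold Spec_parse_argv_py parse_argv_py parse_argv_py_alt
  simp [parseA_loop_eq]
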